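-- pv_equiv track=rewrite | github.com/sayuchan2302/Lab_python | Lab2/task6.py | task6_2
-- ===== SOURCE A (Python) =====
-- def task6_2(text):
--     words = text.replace('\n', ' ').split()
--     lines = text.split('\n')
--     word_positions = {}  # dict
--     position = 1
--     for line in lines:
--         line_words = line.split()
--         for i, word in enumerate(line_words):
--             if i == len(line_words) - 1:
--                 position_value = -position
--             else:
--                 position_value = position
--             if word in word_positions:
--                 word_positions[word].append(position_value)
--             else:
--                 word_positions[word] = [position_value]
--             position += 1
--
--     return word_positions
-- ===== SOURCE B (Python) =====
-- def task6_2(text):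
--     # Split once; flat word sequence = positions 1..N in order.
--     lines = [l.split() for l in text.split('\n')]
--     words = [w for ws in lines for w in ws]
--     # A global position is a line's last exactly when it is a cumulative word count.
--     lasts = set()
--     total = 0
--     for ws in lines:
--         if ws:
--             total += len(ws)
--             lasts.add(total)
--     vals = [-p if p in lasts else p for p in range(1, len(words) + 1)]
--     # One entry per distinct word (first-occurrence order), positions gathered by filtering.
--     return {w: [v for x, v in zip(words, vals) if x == w] for w in dict.fromkeys(words)}
-- ===== Notes on version B (the rewrite author's own statement) =====
-- stated objective: alternative
-- what changed: B eliminates A's running position counter and per-word is-last branch entirely: it signs the global range 1..N by membership in a precomputed set of cumulative line word counts, and builds the dict one distinct word at a time by filtering the (word, value) sequence, instead of A's single interleaved loop with in-place per-word dict appends.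
import Mathlib
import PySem

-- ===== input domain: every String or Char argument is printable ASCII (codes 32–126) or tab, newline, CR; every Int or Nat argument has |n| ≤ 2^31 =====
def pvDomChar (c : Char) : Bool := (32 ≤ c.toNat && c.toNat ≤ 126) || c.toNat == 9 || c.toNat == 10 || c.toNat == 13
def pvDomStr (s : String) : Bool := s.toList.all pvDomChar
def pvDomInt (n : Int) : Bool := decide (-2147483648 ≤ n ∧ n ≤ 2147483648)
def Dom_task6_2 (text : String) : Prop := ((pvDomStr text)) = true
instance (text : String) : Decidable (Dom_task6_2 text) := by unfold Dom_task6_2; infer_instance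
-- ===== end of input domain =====

-- B drops A's running position counter and per-word last-index branch: positions are the global
-- range 1..N negated where they hit a cumulative line word count, and the dict is built one
-- distinct word at a time by filtering that stream (objective: alternative; same return value proved).

-- ===== PORT A =====
-- one step of A's inner `for i, word in enumerate(line_words)` loop; state = (word_positions, position)
def aStep (lineWords : List String) (st : PySem.Dict String (List Int) × Int)
    (iw : Int × String) : PySem.Dict String (List Int) × Int :=
  let positionValue : Int := if iw.1 = PySem.List.len lineWords - 1 then -st.2 else st.2
  let d := if st.1.contains iw.2
           then st.1.insert iw.2 (st.1.getD iw.2 [] ++ [positionValue])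
           else st.1.insert iw.2 [positionValue]
  (d, st.2 + 1)

-- one iteration of A's outer `for line in lines` loop
def aLine (st : PySem.Dict String (List Int) × Int) (line : String) :
    PySem.Dict String (List Int) × Int :=
  let lineWords := PySem.Str.split₀ line
  (PySem.List.enumerate lineWords 0).foldl (aStep lineWords) st

def task6_2 (text : String) : List (String × List Int) :=
  let _words := PySem.Str.split₀ (PySem.Str.replace text "\n" " ")  -- A computes it and never uses it
  let lines := (PySem.Str.split? text "\n").getD []
  (lines.foldl aLine (PySem.Dict.empty, 1)).1.items

-- ===== PORT B =====
-- B's `lasts` loop: state = (lasts, total); a cumulative word count marks each line's last position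
def bLastsStep (st : PySem.Set Int × Int) (ws : List String) : PySem.Set Int × Int :=
  if ws ≠ [] then (PySem.Set.add st.1 (st.2 + (ws.length : Int)), st.2 + (ws.length : Int)) else st

def task6_2_alt (text : String) : List (String × List Int) :=
  let lines := ((PySem.Str.split? text "\n").getD []).map PySem.Str.split₀
  let words := lines.flatMap (fun ws => ws)
  let lasts := (lines.foldl bLastsStep (PySem.Set.empty, 0)).1
  let vals := (PySem.List.pyRange 1 ((words.length : Int) + 1) 1).map
      (fun p => if PySem.Set.contains lasts p then -p else p)
  ((PySem.List.dedup words).foldl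
      (fun d w => d.insert w (((words.zip vals).filter (fun q => q.1 == w)).map (fun q => q.2)))
      PySem.Dict.empty).items

-- ===== PRECONDITION & SPEC =====
def Spec_task6_2 (text : String) (out : List (String × List Int)) : Prop := out = task6_2_alt text
instance (text : String) (out : List (String × List Int)) : Decidable (Spec_task6_2 text out) := by unfold Spec_task6_2; infer_instance

-- ===== CLAIM =====
def Claim_equal_task6_2 : Prop := ∀ (text : String), Dom_task6_2 text → Spec_task6_2 text (task6_2 text)

-- ===== LEMMAS AND PROOFS =====

-- grouping step: d[w].append(v) with default []
def grp (d : PySem.Dict String (List Int)) (p : String × Int) : PySem.Dict String (List Int) :=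
  d.modify p.1 [] (fun xs => xs ++ [p.2])

-- the signed block of a line of n words starting at position `pos`: pos, pos+1, …, -(pos+n-1)
def sblock (pos : Int) : Nat → List Int
  | 0 => []
  | 1 => [-pos]
  | n + 2 => pos :: sblock (pos + 1) (n + 1)

-- the flat (word, signed position) stream A's nested loops feed into the dict, line by line
def stream : List (List String) → Int → List (String × Int)
  | [], _ => []
  | ws :: rest, pos => ws.zip (sblock pos ws.length) ++ stream rest (pos + (ws.length : Int))

-- the cumulative word counts of the nonempty lines, starting from total t
def ends : List (List String) → Int → List Int
  | [], _ => []
  | ws :: rest, t =>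
      if ws ≠ [] then (t + (ws.length : Int)) :: ends rest (t + (ws.length : Int)) else ends rest t

lemma sblock_eq (n : Nat) (hn : n ≠ 0) : ∀ (pos : Int),
    sblock pos n = PySem.List.pyRange pos (pos + (n : Int) - 1) 1 ++ [-(pos + (n : Int) - 1)] := by
  induction n with
  | zero => exact absurd rfl hn
  | succ m ih =>
    intro pos
    match m with
    | 0 => simp [sblock]
    | k + 1 =>
      have e : pos + 1 + ((k + 1 : Nat) : Int) - 1 = pos + ((k + 1 + 1 : Nat) : Int) - 1 := by
        push_cast; ring
      rw [show sblock pos (k + 2) = pos :: sblock (pos + 1) (k + 1) from rfl,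
          ih (by omega) (pos + 1), e,
          PySem.List.pyRange_one_cons
            (show pos < pos + ((k + 1 + 1 : Nat) : Int) - 1 by push_cast; omega)]
      rfl

-- A's dict-update step is the grouping step
lemma aStep_eq (L : List String) (st : PySem.Dict String (List Int) × Int) (iw : Int × String) :
    aStep L st iw
    = (grp st.1 (iw.2, if iw.1 = PySem.List.len L - 1 then -st.2 else st.2), st.2 + 1) := by
  unfold aStep grp PySem.Dict.modify
  by_cases h : st.1.contains iw.2
  · simp [h]
  · simp [h, PySem.Dict.getD_of_not_contains st.1 [] (by simpa using h)]

-- A's inner loop over a suffix `ws` of the line's word list `L`, started at index `k`,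
-- equals grouping the pairs `ws.zip (sblock pos ws.length)`
lemma innerA (L : List String) : ∀ (ws : List String) (k : Int) (d : PySem.Dict String (List Int))
    (pos : Int), k + (ws.length : Int) = PySem.List.len L →
    (PySem.List.enumerate ws k).foldl (aStep L) (d, pos)
    = ((ws.zip (sblock pos ws.length)).foldl grp d, pos + (ws.length : Int)) := by
  intro ws
  induction ws with
  | nil => intro k d pos _; simp [PySem.List.enumerate_nil, sblock]
  | cons w rest ih =>
    intro k d pos hk
    rw [PySem.List.enumerate_cons]
    rw [PySem.List.len_eq] at hk
    match rest with
    | [] =>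
      have hkL : k = PySem.List.len L - 1 := by
        rw [PySem.List.len_eq]; simp at hk; omega
      simp [PySem.List.enumerate_nil, aStep_eq, hkL, sblock]
    | r :: rs =>
      have hkL : ¬ (k = PySem.List.len L - 1) := by
        rw [PySem.List.len_eq]; simp at hk; omega
      have hrec := ih (k + 1) (grp d (w, pos)) (pos + 1)
        (by rw [PySem.List.len_eq]; simp at hk ⊢; omega)
      rw [List.foldl_cons, aStep_eq, if_neg hkL,
          show sblock pos (w :: r :: rs).length = pos :: sblock (pos + 1) (r :: rs).length from rfl,
          List.zip_cons_cons, List.foldl_cons, hrec]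
      simp only [Prod.mk.injEq]
      exact ⟨trivial, by push_cast [List.length_cons]; omega⟩

-- A's whole outer loop is one grouping pass over the flat stream
lemma outerA : ∀ (lines : List String) (d : PySem.Dict String (List Int)) (pos : Int),
    lines.foldl aLine (d, pos)
    = ((stream (lines.map PySem.Str.split₀) pos).foldl grp d,
       pos + (((lines.map PySem.Str.split₀).flatMap (fun ws => ws)).length : Int)) := by
  intro lines
  induction lines with
  | nil => intro d pos; simp [stream]
  | cons line rest ih =>
    intro d pos
    have ha : aLine (d, pos) line
        = (((PySem.Str.split₀ line).zip (sblock pos (PySem.Str.split₀ line).length)).foldl grp d,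
           pos + ((PySem.Str.split₀ line).length : Int)) := by
      unfold aLine
      exact innerA (PySem.Str.split₀ line) (PySem.Str.split₀ line) 0 d pos
        (by rw [PySem.List.len_eq]; simp)
    rw [List.foldl_cons, ha, ih]
    simp only [List.map_cons, stream, List.foldl_append, List.flatMap_cons, List.length_append,
      Prod.mk.injEq]
    exact ⟨trivial, by push_cast; ring⟩

-- every cumulative count in `ends` exceeds the starting total
lemma ends_gt : ∀ (lines : List (List String)) (t : Int), ∀ x ∈ ends lines t, t < x := by
  intro lines
  induction lines with
  | nil => intro t x hx; simp [ends] at hx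
  | cons ws rest ih =>
    intro t x hx
    by_cases h : ws = []
    · exact ih t x (by simpa [ends, h] using hx)
    · rw [ends, if_pos h] at hx
      rcases List.mem_cons.mp hx with h1 | h1
      · have : ws.length ≠ 0 := by simpa using h
        omega
      · have := ih (t + (ws.length : Int)) x h1
        omega

-- B's lasts loop appends the cumulative counts (they are fresh, being strictly above the total)
lemma bLasts : ∀ (lines : List (List String)) (s : List Int) (t : Int),
    (∀ x ∈ s, x ≤ t) →
    lines.foldl bLastsStep (s, t)
    = (s ++ ends lines t, t + ((lines.flatMap (fun ws => ws)).length : Int)) := by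
  intro lines
  induction lines with
  | nil => intro s t _; simp [ends]
  | cons ws rest ih =>
    intro s t hs
    by_cases h : ws = []
    · rw [List.foldl_cons, show bLastsStep (s, t) ws = (s, t) by simp [bLastsStep, h],
          ih s t hs]
      simp [ends, h]
    · have hn : ws.length ≠ 0 := by simpa using h
      have hstep : bLastsStep (s, t) ws = (s ++ [t + (ws.length : Int)], t + (ws.length : Int)) := by
        have hm : (t + (ws.length : Int)) ∉ s := fun hmem => by have := hs _ hmem; omega
        simp [bLastsStep, h, PySem.Set.add, PySem.Set.contains, hm]
      rw [List.foldl_cons, hstep,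
          ih (s ++ [t + (ws.length : Int)]) (t + (ws.length : Int))
            (by intro x hx
                rcases List.mem_append.mp hx with h1 | h1
                · have := hs _ h1; omega
                · simp at h1; omega)]
      rw [ends, if_pos h]
      simp only [List.flatMap_cons, List.length_append, List.append_assoc, List.singleton_append,
        Prod.mk.injEq]
      exact ⟨trivial, by push_cast; ring⟩

-- the flat stream is the word list zipped with the globally signed range,
-- where E agrees with the cumulative counts above the current total
lemma stream_eq : ∀ (lines : List (List String)) (t : Int) (E : List Int),
    (∀ p, t < p → (p ∈ E ↔ p ∈ ends lines t)) →
    stream lines (t + 1)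
    = (lines.flatMap (fun ws => ws)).zip
        ((PySem.List.pyRange (t + 1) (t + 1 + ((lines.flatMap (fun ws => ws)).length : Int)) 1).map
          (fun p => if E.contains p then -p else p)) := by
  intro lines
  induction lines with
  | nil => intro t E _; simp [stream]
  | cons ws rest ih =>
    intro t E hE
    by_cases h : ws = []
    · subst h
      simp only [stream, List.length_nil, Nat.cast_zero, add_zero, List.zip_nil_left,
        List.nil_append, List.flatMap_cons]
      exact ih t E (fun p hp => by rw [hE p hp]; simp [ends])
    · have hn : ws.length ≠ 0 := by simpa using h
      have hEnds : ends (ws :: rest) t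
          = (t + (ws.length : Int)) :: ends rest (t + (ws.length : Int)) := by
        rw [ends, if_pos h]
      -- membership of E inside the current block
      have hmem : ∀ p, t < p → p ≤ t + (ws.length : Int) →
          (E.contains p = true ↔ p = t + (ws.length : Int)) := by
        intro p hp1 hp2
        rw [List.contains_iff_mem, hE p hp1, hEnds]
        constructor
        · intro hx
          rcases List.mem_cons.mp hx with h1 | h1
          · exact h1
          · have := ends_gt rest (t + (ws.length : Int)) p h1; omega
        · intro hx; simp [hx]
      -- split the global range at the end of this line
      have hsplit : PySem.List.pyRange (t + 1)
            (t + 1 + (((ws :: rest).flatMap (fun ws => ws)).length : Int)) 1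
          = PySem.List.pyRange (t + 1) (t + 1 + (ws.length : Int)) 1
            ++ PySem.List.pyRange (t + 1 + (ws.length : Int))
                (t + 1 + (((ws :: rest).flatMap (fun ws => ws)).length : Int)) 1 := by
        apply PySem.List.pyRange_one_append
        · omega
        · simp only [List.flatMap_cons, List.length_append]; push_cast; omega
      have hlen1 : (PySem.List.pyRange (t + 1) (t + 1 + (ws.length : Int)) 1).length
          = ws.length := by
        rw [PySem.List.pyRange_one]; simp
      -- the first block of the signed range is exactly sblock
      have hblock : (PySem.List.pyRange (t + 1) (t + 1 + (ws.length : Int)) 1).map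
            (fun p => if E.contains p then -p else p)
          = sblock (t + 1) ws.length := by
        have hsr : PySem.List.pyRange (t + 1) (t + 1 + (ws.length : Int)) 1
            = PySem.List.pyRange (t + 1) (t + (ws.length : Int)) 1 ++ [t + (ws.length : Int)] := by
          have h1 := PySem.List.pyRange_one_succ_right
            (a := t + 1) (b := t + (ws.length : Int)) (by omega)
          rw [show t + (ws.length : Int) + 1 = t + 1 + (ws.length : Int) by ring] at h1
          exact h1
        rw [hsr, List.map_append, sblock_eq ws.length hn (t + 1),
            show t + 1 + (ws.length : Int) - 1 = t + (ws.length : Int) by ring]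
        congr 1
        · have hall : ∀ p ∈ PySem.List.pyRange (t + 1) (t + (ws.length : Int)) 1,
              (if E.contains p then -p else p) = p := by
            intro p hp
            rcases PySem.List.mem_pyRange_one.mp hp with ⟨hp1, hp2⟩
            exact if_neg (by rw [hmem p (by omega) (by omega)]; omega)
          exact (List.map_congr_left hall).trans (List.map_id _)
        · have hl : (t + (ws.length : Int)) ∈ E := by
            exact List.contains_iff_mem.mp (by rw [hmem (t + (ws.length : Int)) (by omega) (by omega)])
          simp [hl]
      -- assemble
      simp only [stream, List.flatMap_cons, List.length_append]
      rw [show ((ws.length + (rest.flatMap (fun ws => ws)).length : Nat) : Int)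
            = (ws.length : Int) + ((rest.flatMap (fun ws => ws)).length : Int) by push_cast; ring,
          show t + 1 + ((ws.length : Int) + ((rest.flatMap (fun ws => ws)).length : Int))
            = t + 1 + (ws.length : Int) + ((rest.flatMap (fun ws => ws)).length : Int) by ring,
          PySem.List.pyRange_one_append (t + 1) (t + 1 + (ws.length : Int))
            (t + 1 + (ws.length : Int) + ((rest.flatMap (fun ws => ws)).length : Int))
            (by omega) (by omega),
          List.map_append, List.zip_append (by rw [List.length_map, hlen1]), hblock]
      congr 1
      have hrec := ih (t + (ws.length : Int)) E
        (fun p hp => by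
          rw [hE p (by omega), hEnds]
          constructor
          · intro hx
            rcases List.mem_cons.mp hx with h1 | h1
            · omega
            · exact h1
          · intro hx; exact List.mem_cons_of_mem _ hx)
      rw [show t + 1 + (ws.length : Int) = t + (ws.length : Int) + 1 by ring, hrec]

-- grp written as the lambda the Dict library lemmas expect
lemma grp_eq : grp = fun d (p : String × Int) => d.modify p.1 [] (fun xs => xs ++ [p.2]) := rfl

-- ===== VERDICT =====
theorem task6_2_spec : Claim_equal_task6_2 := by
  intro text _
  unfold Spec_task6_2 task6_2 task6_2_alt
  dsimp only
  set lines := (PySem.Str.split? text "\n").getD [] with hlines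
  set tls := lines.map PySem.Str.split₀ with htls
  set words := tls.flatMap (fun ws => ws) with hwords
  set E := ends tls 0 with hEdef
  have hLasts : (tls.foldl bLastsStep (PySem.Set.empty, 0)).1 = E := by
    rw [bLasts tls PySem.Set.empty 0 (by intro x hx; simp [PySem.Set.empty] at hx)]
    simp [PySem.Set.empty]
    exact hEdef.symm
  rw [outerA lines PySem.Dict.empty 1, hLasts]
  dsimp only
  dsimp only [PySem.Set.contains]
  set vals := (PySem.List.pyRange 1 ((words.length : Int) + 1) 1).map
      (fun p => if E.contains p then -p else p) with hvals
  have hvlen : vals.length = words.length := by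
    rw [hvals, List.length_map, PySem.List.pyRange_one]; simp
  have hS : stream tls 1 = words.zip vals := by
    have hst := stream_eq tls 0 E (fun p _ => Iff.rfl)
    rw [show (0 : Int) + 1 = 1 from rfl] at hst
    rw [hst, hvals]
    congr 3
    ring
  rw [hS]
  set S := words.zip vals with hSdef
  have hnodup : ((S.foldl grp PySem.Dict.empty).keys).Nodup := by
    rw [grp_eq]
    exact PySem.Dict.nodup_keys_foldl_modify_key S Prod.fst []
      (fun _ p => fun xs => xs ++ [p.2]) PySem.Dict.empty (by simp)
  have hkeys : (S.foldl grp PySem.Dict.empty).keys = PySem.Set.ofList words := by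
    have hfst : S.map Prod.fst = words := by
      rw [hSdef]; exact List.map_fst_zip (by omega)
    rw [grp_eq,
        PySem.Dict.keys_foldl_modify_key S Prod.fst [] (fun _ p => fun xs => xs ++ [p.2])
          PySem.Dict.empty,
        hfst, PySem.Dict.keys_empty]
    exact (PySem.Set.ofList_eq_foldl words).symm
  have hgetD : ∀ w, (S.foldl grp PySem.Dict.empty).getD w []
      = (List.filter (fun q => q.1 == w) S).map (fun q => q.2) := by
    intro w
    have := PySem.Dict.getD_foldl_modify_append S PySem.Dict.empty w
    simpa [grp, PySem.Dict.getD_empty] using this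
  have hAitems : ((S.foldl grp PySem.Dict.empty)).items
      = (PySem.Set.ofList words).map
          (fun w => (w, (List.filter (fun q => q.1 == w) S).map (fun q => q.2))) := by
    rw [PySem.Dict.items_eq_map_keys _ hnodup [], hkeys]
    exact List.map_congr_left (fun w _ => by rw [hgetD w])
  have hBitems : ((PySem.List.dedup words).foldl
        (fun d w => d.insert w ((S.filter (fun q => q.1 == w)).map (fun q => q.2)))
        PySem.Dict.empty).items
      = (PySem.List.dedup words).map
          (fun w => (w, (List.filter (fun q => q.1 == w) S).map (fun q => q.2))) := by
    have := PySem.Dict.items_foldl_insert_fresh (PySem.List.dedup words) (fun w => w)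
      (fun w => ((S.filter (fun q => q.1 == w)).map (fun q => q.2)))
      PySem.Dict.empty (by intro a _; exact PySem.Dict.contains_empty a)
      (by simp)
    simp at this
    exact this
  have hdd : (PySem.List.dedup words).map
        (fun w => (w, (List.filter (fun q => q.1 == w) S).map (fun q => q.2)))
      = (PySem.Set.ofList words).map
        (fun w => (w, (List.filter (fun q => q.1 == w) S).map (fun q => q.2))) := by
    rw [PySem.List.dedup_eq_ofList]
  -- the remaining difference between the goal's B side and hBitems is definitional
  exact hAitems.trans ((hdd.symm).trans hBitems.symm)
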